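-- pv_equiv track=rewrite | github.com/ojferro/SemanticSegmentationAirways | nbs/app.py | get_non_None_section
-- ===== SOURCE A (Python) =====
-- def get_non_None_section(last_values):
--     # No blobs had children. Lost tracking
--     if last_values.count(None) == len(last_values):
--         raise Exception('Error tracking. Was not able to correlate any blobs. Must reset')
--
--     start_none = 0
--     end_none = len(last_values)-1
--     for j, val in enumerate(last_values):
--         if val is not None:
--             start_none=j
--             break
--
--     for j, val in enumerate(reversed(last_values)):
--         ctr=len(last_values)-1-j
--         if val is not None and ctr >= start_none:
--             end_none=ctr
--             break
--     return start_none, end_none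
-- ===== SOURCE B (Python) =====
-- def get_non_None_section(last_values):
--     if last_values.count(None) == len(last_values):
--         raise Exception('Error tracking. Was not able to correlate any blobs. Must reset')
--     idxs = [i for i, v in enumerate(last_values) if v is not None]
--     return idxs[0], idxs[-1]
-- ===== Notes on version B (the rewrite author's own statement) =====
-- stated objective: simpler
-- what changed: Replaces the two early-break scans (forward find, reversed find with a ctr>=start test) by one enumerate pass that collects all non-None indices and returns its first and last element.
import Mathlib
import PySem

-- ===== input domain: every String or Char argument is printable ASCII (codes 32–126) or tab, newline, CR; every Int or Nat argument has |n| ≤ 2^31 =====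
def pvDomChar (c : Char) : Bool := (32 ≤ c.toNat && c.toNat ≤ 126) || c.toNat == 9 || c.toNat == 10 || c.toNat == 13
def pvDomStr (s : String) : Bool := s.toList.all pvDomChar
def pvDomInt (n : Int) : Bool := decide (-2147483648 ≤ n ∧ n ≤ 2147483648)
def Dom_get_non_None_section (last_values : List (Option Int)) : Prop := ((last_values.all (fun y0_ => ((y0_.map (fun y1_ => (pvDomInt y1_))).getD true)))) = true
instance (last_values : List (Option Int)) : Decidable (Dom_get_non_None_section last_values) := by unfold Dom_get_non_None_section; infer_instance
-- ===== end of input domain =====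

-- B replaces A's two early-break scans (forward find, reversed find guarded by ctr >= start)
-- with one enumerate pass collecting all non-None indices and reading its endpoints (objective: simpler).

-- ===== PORT A =====
-- first for-loop: break at the first non-None value, yielding its index (scanning from j)
def pvAForward : List (Option Int) → Int → Option Int
  | [], _ => none
  | some _ :: _, j => some j
  | none :: rest, j => pvAForward rest (j + 1)

-- second for-loop over reversed(last_values): ctr counts down; break when val is not None and ctr >= start
def pvABackward : List (Option Int) → Int → Int → Option Int
  | [], _, _ => none
  | some _ :: rest, ctr, start =>
      if start ≤ ctr then some ctr else pvABackward rest (ctr - 1) start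
  | none :: rest, ctr, start => pvABackward rest (ctr - 1) start

def get_non_None_section (last_values : List (Option Int)) : Int × Int :=
  if last_values.count none = last_values.length then
    (0, (last_values.length : Int) - 1)  -- Python raises Exception here; excluded by Pre_
  else
    let start_none := (pvAForward last_values 0).getD 0
    let end_none :=
      (pvABackward last_values.reverse ((last_values.length : Int) - 1) start_none).getD
        ((last_values.length : Int) - 1)
    (start_none, end_none)

-- ===== PORT B =====
def get_non_None_section_alt (last_values : List (Option Int)) : Int × Int :=
  if last_values.count none = last_values.length then
    (0, (last_values.length : Int) - 1)  -- Python raises Exception here; excluded by Pre_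
  else
    let idxs := (PySem.List.enumerate last_values 0).filterMap
      (fun p => if p.2 ≠ none then some p.1 else none)
    ((PySem.List.pyGet? idxs 0).getD 0, (PySem.List.pyGet? idxs (-1)).getD 0)

-- ===== PRECONDITION & SPEC =====
-- Pre_ excludes exactly the all-None lists (including []), on which the Python A raises Exception.
def Pre_get_non_None_section (last_values : List (Option Int)) : Prop :=
  ∃ x ∈ last_values, x ≠ none
instance (last_values : List (Option Int)) : Decidable (Pre_get_non_None_section last_values) := by
  unfold Pre_get_non_None_section; infer_instance

def pvWitness_get_non_None_section : List (Option Int) := [none, some 3, none, some 1]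

def Spec_get_non_None_section (last_values : List (Option Int)) (out : Int × Int) : Prop :=
  out = get_non_None_section_alt last_values
instance (last_values : List (Option Int)) (out : Int × Int) :
    Decidable (Spec_get_non_None_section last_values out) := by
  unfold Spec_get_non_None_section; infer_instance

-- ===== CLAIM (what is proved, stated in full; the proofs are below) =====
def Claim_equal_get_non_None_section : Prop :=
  ∀ (last_values : List (Option Int)), Dom_get_non_None_section last_values →
    Pre_get_non_None_section last_values →
    Spec_get_non_None_section last_values (get_non_None_section last_values)

-- ===== LEMMAS AND PROOFS =====

-- the list of indices of the non-None entries of l, starting index j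
def pvNN : List (Option Int) → Int → List Int
  | [], _ => []
  | some _ :: r, j => j :: pvNN r (j + 1)
  | none :: r, j => pvNN r (j + 1)

theorem pvNN_bridge (l : List (Option Int)) (j : Int) :
    (PySem.List.enumerate l j).filterMap (fun p => if p.2 ≠ none then some p.1 else none)
      = pvNN l j := by
  induction l generalizing j with
  | nil => simp [pvNN, PySem.List.enumerate_nil]
  | cons x r ih =>
    cases x <;> simp [pvNN, PySem.List.enumerate_cons] <;> simpa using ih (j + 1)

theorem pvAForward_eq_head? (l : List (Option Int)) (j : Int) :
    pvAForward l j = (pvNN l j).head? := by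
  induction l generalizing j with
  | nil => rfl
  | cons x r ih => cases x <;> simp [pvAForward, pvNN, ih]

theorem pvNN_le (l : List (Option Int)) (j : Int) : ∀ x ∈ pvNN l j, j ≤ x := by
  induction l generalizing j with
  | nil => simp [pvNN]
  | cons x r ih =>
    cases x with
    | none =>
      intro y hy
      have := ih (j + 1) y hy
      omega
    | some v =>
      intro y hy
      simp [pvNN] at hy
      rcases hy with rfl | hy
      · omega
      · have := ih (j + 1) y hy; omega

theorem pvNN_pairwise (l : List (Option Int)) (j : Int) :
    (pvNN l j).Pairwise (· ≤ ·) := by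
  induction l generalizing j with
  | nil => simp [pvNN]
  | cons x r ih =>
    cases x with
    | none => simpa [pvNN] using ih (j + 1)
    | some v =>
      refine List.pairwise_cons.mpr ⟨fun y hy => ?_, ih (j + 1)⟩
      have := pvNN_le r (j + 1) y hy
      omega

theorem pvNN_ne_nil (l : List (Option Int)) (j : Int)
    (h : ∃ x ∈ l, x ≠ none) : pvNN l j ≠ [] := by
  induction l generalizing j with
  | nil => simp at h
  | cons x r ih =>
    cases x with
    | some v => simp [pvNN]
    | none =>
      rcases h with ⟨y, hy, hne⟩
      rcases List.mem_cons.mp hy with rfl | hy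
      · exact absurd rfl hne
      · exact ih (j + 1) ⟨y, hy, hne⟩

theorem pvNN_append (a b : List (Option Int)) (j : Int) :
    pvNN (a ++ b) j = pvNN a j ++ pvNN b (j + a.length) := by
  induction a generalizing j with
  | nil => simp [pvNN]
  | cons x r ih =>
    cases x <;> simp [pvNN, ih] <;> ring_nf

theorem head?_le_getLast? {xs : List Int} {a b : Int}
    (hp : xs.Pairwise (· ≤ ·)) (ha : xs.head? = some a) (hb : xs.getLast? = some b) :
    a ≤ b := by
  cases xs with
  | nil => simp at ha
  | cons h t =>
    simp at ha; subst ha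
    have hmem : b ∈ h :: t := List.mem_of_getLast? hb
    rcases List.mem_cons.mp hmem with rfl | hmem
    · exact le_refl b
    · exact (List.pairwise_cons.mp hp).1 b hmem

theorem pvABackward_spec (l : List (Option Int)) (s m : Int)
    (hm : (pvNN l 0).getLast? = some m) (hs : s ≤ m) :
    pvABackward l.reverse ((l.length : Int) - 1) s = some m := by
  induction l using List.reverseRecOn with
  | nil => simp [pvNN] at hm
  | append_singleton t x ih =>
    cases x with
    | some v =>
      have hNN : pvNN (t ++ [some v]) 0 = pvNN t 0 ++ [(t.length : Int)] := by
        simpa [pvNN] using pvNN_append t [some v] 0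
      rw [hNN] at hm
      simp [List.getLast?_append] at hm
      subst hm
      have hctr : ((t ++ [some v]).length : Int) - 1 = (t.length : Int) := by
        simp
      rw [List.reverse_append, hctr]
      simp [pvABackward, hs]
    | none =>
      have hNN : pvNN (t ++ [none]) 0 = pvNN t 0 := by
        simpa [pvNN] using pvNN_append t [none] 0
      rw [hNN] at hm
      have hctr : ((t ++ [(none : Option Int)]).length : Int) - 1 - 1 = (t.length : Int) - 1 := by
        simp
      rw [List.reverse_append]
      simp only [List.reverse_cons, List.reverse_nil, List.nil_append, List.cons_append]

      show pvABackward ((none : Option Int) :: t.reverse) _ s = some m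
      rw [show pvABackward ((none : Option Int) :: t.reverse)
            (((t ++ [(none : Option Int)]).length : Int) - 1) s
          = pvABackward t.reverse (((t ++ [(none : Option Int)]).length : Int) - 1 - 1) s from rfl,
        hctr]
      exact ih hm

-- ===== VERDICT (by name: the statement is the Claim_ definition above) =====
theorem get_non_None_section_spec : Claim_equal_get_non_None_section := by
  intro l _ hPre
  unfold Spec_get_non_None_section get_non_None_section get_non_None_section_alt
  have hcount : ¬ l.count none = l.length := by
    intro hc
    rcases hPre with ⟨x, hx, hne⟩
    exact hne ((List.count_eq_length.mp hc) x hx).symm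
  rw [if_neg hcount, if_neg hcount]
  have hnil : pvNN l 0 ≠ [] := pvNN_ne_nil l 0 hPre
  obtain ⟨a, ha⟩ := Option.isSome_iff_exists.mp (by
    rw [List.isSome_head?]; exact hnil)
  obtain ⟨m, hmm⟩ := Option.isSome_iff_exists.mp (by
    exact List.getLast?_isSome.mpr hnil)
  have ham : a ≤ m := head?_le_getLast? (pvNN_pairwise l 0) ha hmm
  have hfw : pvAForward l 0 = some a := by rw [pvAForward_eq_head?, ha]
  have hbw : pvABackward l.reverse ((l.length : Int) - 1) a = some m :=
    pvABackward_spec l a m hmm ham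
  simp only [pvNN_bridge, hfw, Option.getD_some, hbw,
    PySem.List.pyGet?_zero, PySem.List.pyGet?_neg_one,
    ← List.head?_eq_getElem?, ha, hmm]
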